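-- pv_equiv track=rewrite | github.com/SebasMP14/Codigos_Pruebas | Procesamiento1.py | limpiar_listas
-- ===== SOURCE A (Python) =====
-- def limpiar_listas(tiempos, cuentas, temperaturas):
--     """Elimina valores None y alinea listas"""
--     tiempos_filtrados = []
--     cuentas_filtradas = []
--     temperaturas_filtradas = []
--
--     for i in range(len(tiempos)):
--         if cuentas[i] is not None or temperaturas[i] is not None:
--             tiempos_filtrados.append(tiempos[i])
--             cuentas_filtradas.append(cuentas[i] if cuentas[i] is not None else cuentas_filtradas[-1] if cuentas_filtradas else 0)
--             temperaturas_filtradas.append(temperaturas[i] if temperaturas[i] is not None else temperaturas_filtradas[-1] if temperaturas_filtradas else 0)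
--
--     return tiempos_filtrados, cuentas_filtradas, temperaturas_filtradas
-- ===== SOURCE B (Python) =====
-- def limpiar_listas(tiempos, cuentas, temperaturas):
--     """Elimina valores None y alinea listas"""
--     kept = [(t, c, T) for t, c, T in zip(tiempos, cuentas, temperaturas)
--             if c is not None or T is not None]
--
--     def ffill(values):
--         out, last = [], 0
--         for v in values:
--             last = v if v is not None else last
--             out.append(last)
--         return out
--
--     return ([t for t, _, _ in kept],
--             ffill([c for _, c, _ in kept]),
--             ffill([T for _, _, T in kept]))
-- ===== Notes on version B (the rewrite author's own statement) =====
-- stated objective: simpler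
-- what changed: A's single combined loop with index arithmetic and [-1] look-backs is replaced by one zip-filter pass selecting kept rows followed by two independent forward-fill passes that each carry a running 'last' value.
import Mathlib
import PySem

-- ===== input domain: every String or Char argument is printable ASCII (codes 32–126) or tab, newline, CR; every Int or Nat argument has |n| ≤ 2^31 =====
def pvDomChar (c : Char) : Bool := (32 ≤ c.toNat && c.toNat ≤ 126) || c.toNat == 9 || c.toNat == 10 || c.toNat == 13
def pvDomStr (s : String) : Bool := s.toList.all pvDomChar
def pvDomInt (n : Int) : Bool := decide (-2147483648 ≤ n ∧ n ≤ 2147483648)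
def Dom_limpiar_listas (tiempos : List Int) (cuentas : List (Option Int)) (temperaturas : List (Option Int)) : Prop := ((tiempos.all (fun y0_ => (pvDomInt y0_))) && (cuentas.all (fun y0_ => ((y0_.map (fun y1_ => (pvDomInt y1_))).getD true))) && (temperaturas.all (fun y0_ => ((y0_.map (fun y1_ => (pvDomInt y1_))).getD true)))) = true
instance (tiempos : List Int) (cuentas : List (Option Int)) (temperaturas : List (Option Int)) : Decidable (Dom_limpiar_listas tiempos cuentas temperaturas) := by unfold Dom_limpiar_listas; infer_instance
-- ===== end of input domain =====

-- B replaces A's single index-driven loop with [-1] look-backs by a zip-filter pass plus two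
-- independent forward-fill passes (objective: simpler); return-value equivalence only (no mutation).

-- ===== PORT A =====
def limpiar_listas (tiempos : List Int) (cuentas : List (Option Int)) (temperaturas : List (Option Int)) : List Int × List Int × List Int :=
  (List.range tiempos.length).foldl
    (fun acc (i : Nat) =>
      let ci := (PySem.List.pyGet? cuentas (i : Int)).getD none        -- cuentas[i]
      let Ti := (PySem.List.pyGet? temperaturas (i : Int)).getD none   -- temperaturas[i]
      if ci.isSome || Ti.isSome then
        (acc.1 ++ [(PySem.List.pyGet? tiempos (i : Int)).getD 0],
         acc.2.1 ++ [match ci with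
           | some v => v
           | none => (acc.2.1.getLast?).getD 0],   -- cuentas_filtradas[-1] if cuentas_filtradas else 0
         acc.2.2 ++ [match Ti with
           | some v => v
           | none => (acc.2.2.getLast?).getD 0])
      else acc)
    ([], [], [])

-- ===== PORT B =====
-- forward fill: running `last` starts at 0; append the value if present, else the last appended
def pvFfill (xs : List (Option Int)) : List Int :=
  (xs.foldl (fun (s : List Int × Int) v =>
      let last := v.getD s.2
      (s.1 ++ [last], last)) ([], 0)).1

def limpiar_listas_alt (tiempos : List Int) (cuentas : List (Option Int)) (temperaturas : List (Option Int)) : List Int × List Int × List Int :=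
  let kept := (tiempos.zip (cuentas.zip temperaturas)).filter
      (fun r => r.2.1.isSome || r.2.2.isSome)
  (kept.map (fun r => r.1),
   pvFfill (kept.map (fun r => r.2.1)),
   pvFfill (kept.map (fun r => r.2.2)))

-- ===== PRECONDITION & SPEC =====
-- Pre_: A indexes cuentas[i] and temperaturas[i] for every i < len(tiempos), so it raises
-- IndexError whenever either list is shorter than tiempos; exactly those inputs are excluded.
def Pre_limpiar_listas (tiempos : List Int) (cuentas : List (Option Int)) (temperaturas : List (Option Int)) : Prop :=
  tiempos.length ≤ cuentas.length ∧ tiempos.length ≤ temperaturas.length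
instance (tiempos : List Int) (cuentas : List (Option Int)) (temperaturas : List (Option Int)) : Decidable (Pre_limpiar_listas tiempos cuentas temperaturas) := by unfold Pre_limpiar_listas; infer_instance

def pvWitness_limpiar_listas : List Int × List (Option Int) × List (Option Int) :=
  ([1, 2, 3], [some 5, none, none], [none, some 7, none])

def Spec_limpiar_listas (tiempos : List Int) (cuentas : List (Option Int)) (temperaturas : List (Option Int)) (out : List Int × List Int × List Int) : Prop := out = limpiar_listas_alt tiempos cuentas temperaturas
instance (tiempos : List Int) (cuentas : List (Option Int)) (temperaturas : List (Option Int)) (out : List Int × List Int × List Int) : Decidable (Spec_limpiar_listas tiempos cuentas temperaturas out) := by unfold Spec_limpiar_listas; infer_instance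

-- ===== CLAIM (what is proved, stated in full; the proofs are below) =====
def Claim_equal_limpiar_listas : Prop := ∀ (tiempos : List Int) (cuentas : List (Option Int)) (temperaturas : List (Option Int)), Dom_limpiar_listas tiempos cuentas temperaturas → Pre_limpiar_listas tiempos cuentas temperaturas → Spec_limpiar_listas tiempos cuentas temperaturas (limpiar_listas tiempos cuentas temperaturas)


-- ===== LEMMAS AND PROOFS =====

-- the forward-fill fold state: running `last` equals the last element appended so far (0 if none)
def pvFfillState (xs : List (Option Int)) : List Int × Int :=
  xs.foldl (fun (s : List Int × Int) v =>
      let last := v.getD s.2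
      (s.1 ++ [last], last)) ([], 0)

lemma pvFfill_eq_state (xs : List (Option Int)) : pvFfill xs = (pvFfillState xs).1 := rfl

lemma pvFfillState_inv (xs : List (Option Int)) :
    ∀ (s : List Int × Int), s.2 = s.1.getLast?.getD 0 →
      (xs.foldl (fun (s : List Int × Int) v =>
        let last := v.getD s.2
        (s.1 ++ [last], last)) s).2
      = (xs.foldl (fun (s : List Int × Int) v =>
        let last := v.getD s.2
        (s.1 ++ [last], last)) s).1.getLast?.getD 0 := by
  induction xs with
  | nil => intro s hs; simpa using hs
  | cons x xs ih =>
    intro s hs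
    simp only [List.foldl_cons]
    exact ih _ (by simp)

lemma pvFfillState_snd (xs : List (Option Int)) :
    (pvFfillState xs).2 = (pvFfillState xs).1.getLast?.getD 0 := by
  unfold pvFfillState
  exact pvFfillState_inv xs ([], 0) (by simp)

lemma pvFfillState_append_singleton (xs : List (Option Int)) (x : Option Int) :
    pvFfillState (xs ++ [x]) =
      ((pvFfillState xs).1 ++ [x.getD (pvFfillState xs).2], x.getD (pvFfillState xs).2) := by
  unfold pvFfillState
  simp [List.foldl_append]

-- main loop invariant: after processing indices 0..n-1, A's state equals B's pipeline on the
-- first n rows of the zipped input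
lemma pvLoopA_eq (tiempos : List Int) (cuentas temperaturas : List (Option Int))
    (hc : tiempos.length ≤ cuentas.length) (hT : tiempos.length ≤ temperaturas.length)
    (n : Nat) (hn : n ≤ tiempos.length) :
    (List.range n).foldl
      (fun acc (i : Nat) =>
        let ci := (PySem.List.pyGet? cuentas (i : Int)).getD none
        let Ti := (PySem.List.pyGet? temperaturas (i : Int)).getD none
        if ci.isSome || Ti.isSome then
          (acc.1 ++ [(PySem.List.pyGet? tiempos (i : Int)).getD 0],
           acc.2.1 ++ [match ci with
             | some v => v
             | none => (acc.2.1.getLast?).getD 0],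
           acc.2.2 ++ [match Ti with
             | some v => v
             | none => (acc.2.2.getLast?).getD 0])
        else acc)
      ([], [], [])
    =
    (let kept := (((tiempos.zip (cuentas.zip temperaturas)).take n).filter
        (fun r => r.2.1.isSome || r.2.2.isSome))
     (kept.map (fun r => r.1),
      pvFfill (kept.map (fun r => r.2.1)),
      pvFfill (kept.map (fun r => r.2.2)))) := by
  induction n with
  | zero => simp [pvFfill]
  | succ n ih =>
    have hn' : n ≤ tiempos.length := Nat.le_of_succ_le hn
    have hnt : n < tiempos.length := hn
    have hnc : n < cuentas.length := lt_of_lt_of_le hnt hc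
    have hnT : n < temperaturas.length := lt_of_lt_of_le hnt hT
    have hz : n < (tiempos.zip (cuentas.zip temperaturas)).length := by
      simp [List.length_zip]; omega
    rw [List.range_succ, List.foldl_append, ih hn']
    have htake : (tiempos.zip (cuentas.zip temperaturas)).take (n+1)
        = (tiempos.zip (cuentas.zip temperaturas)).take n
          ++ [(tiempos[n], (cuentas[n], temperaturas[n]))] := by
      rw [List.take_add_one]
      simp [List.getElem?_eq_getElem hz, List.getElem_zip]
    rw [htake]
    have hgc : PySem.List.pyGet? cuentas (n : Int) = some cuentas[n] :=
      PySem.List.pyGet?_ofNat cuentas n hnc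
    have hgT : PySem.List.pyGet? temperaturas (n : Int) = some temperaturas[n] :=
      PySem.List.pyGet?_ofNat temperaturas n hnT
    have hgt : PySem.List.pyGet? tiempos (n : Int) = some tiempos[n] :=
      PySem.List.pyGet?_ofNat tiempos n hnt
    simp only [List.foldl_cons, List.foldl_nil, hgc, hgT, hgt, Option.getD_some,
      List.filter_append]
    by_cases hcond : (cuentas[n].isSome || temperaturas[n].isSome) = true
    · have hfil : List.filter (fun (r : Int × Option Int × Option Int) => r.2.1.isSome || r.2.2.isSome)
          [(tiempos[n], (cuentas[n], temperaturas[n]))] = [(tiempos[n], (cuentas[n], temperaturas[n]))] := by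
        simp [List.filter, hcond]
      rw [hfil, if_pos hcond]
      simp only [List.map_append, List.map_cons, List.map_nil, pvFfill_eq_state,
        pvFfillState_append_singleton]
      refine congrArg₂ Prod.mk rfl (congrArg₂ Prod.mk ?_ ?_)
      · rw [pvFfillState_snd]
        cases hcc : cuentas[n] <;> simp
      · rw [pvFfillState_snd]
        cases hTT : temperaturas[n] <;> simp
    · have hfil : List.filter (fun (r : Int × Option Int × Option Int) => r.2.1.isSome || r.2.2.isSome)
          [(tiempos[n], (cuentas[n], temperaturas[n]))] = [] := by
        simp only [List.filter, hcond]
      rw [hfil, if_neg hcond]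
      simp

lemma pvZip_take_all (tiempos : List Int) (cuentas temperaturas : List (Option Int)) :
    (tiempos.zip (cuentas.zip temperaturas)).take tiempos.length
      = tiempos.zip (cuentas.zip temperaturas) := by
  apply List.take_of_length_le
  simp [List.length_zip]

-- ===== VERDICT (by name: the statement is the Claim_ definition above) =====
theorem limpiar_listas_spec : Claim_equal_limpiar_listas := by
  intro tiempos cuentas temperaturas _ hpre
  obtain ⟨hc, hT⟩ := hpre
  unfold Spec_limpiar_listas limpiar_listas limpiar_listas_alt
  rw [pvLoopA_eq tiempos cuentas temperaturas hc hT tiempos.length le_rfl,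
    pvZip_take_all tiempos cuentas temperaturas]
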